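-- pv_equiv track=rewrite | github.com/tylersahagun/elmer | pm-workspace-docs/scripts/memory/sync_status_digests_to_memory.py | infer_projects_from_text
-- ===== SOURCE A (Python) =====
-- from typing import Dict, List
--
-- def infer_projects_from_text(text: str, projects: List[Dict]) -> List[str]:
--     normalized = text.lower()
--     matches = []
--     for project in projects:
--         pid = project.get("project_id")
--         pname = (project.get("initiative_name") or "").lower()
--         if not pid:
--             continue
--         if pid in normalized or (pname and pname in normalized):
--             matches.append(pid)
--     return sorted(set(matches))
-- ===== SOURCE B (Python) =====
-- from typing import Dict, List
--
-- def infer_projects_from_text(text: str, projects: List[Dict]) -> List[str]: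
--     # Two-phase: group the (non-empty, lowered) initiative names by distinct
--     # project id first, then run the substring tests once per distinct id.
--     normalized = text.lower()
--     index = {}
--     for project in projects:
--         pid = project.get("project_id")
--         if not pid:
--             continue
--         names = index.setdefault(pid, [])
--         name = (project.get("initiative_name") or "").lower()
--         if name:
--             names.append(name)
--     return sorted(pid for pid, names in index.items()
--                   if pid in normalized or any(n in normalized for n in names))
-- ===== Notes on version B (the rewrite author's own statement) =====
-- stated objective: alternative
-- what changed: B replaces A's append-then-dedup single pass (test every project row, collect matching ids, sorted(set(..))) by a two-phase group-then-test: it first builds a dict grouping the non-empty lowered initiative names under each distinct truthy project id, then runs the substring tests once per distinct id and sorts the surviving keys.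
import Mathlib
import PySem

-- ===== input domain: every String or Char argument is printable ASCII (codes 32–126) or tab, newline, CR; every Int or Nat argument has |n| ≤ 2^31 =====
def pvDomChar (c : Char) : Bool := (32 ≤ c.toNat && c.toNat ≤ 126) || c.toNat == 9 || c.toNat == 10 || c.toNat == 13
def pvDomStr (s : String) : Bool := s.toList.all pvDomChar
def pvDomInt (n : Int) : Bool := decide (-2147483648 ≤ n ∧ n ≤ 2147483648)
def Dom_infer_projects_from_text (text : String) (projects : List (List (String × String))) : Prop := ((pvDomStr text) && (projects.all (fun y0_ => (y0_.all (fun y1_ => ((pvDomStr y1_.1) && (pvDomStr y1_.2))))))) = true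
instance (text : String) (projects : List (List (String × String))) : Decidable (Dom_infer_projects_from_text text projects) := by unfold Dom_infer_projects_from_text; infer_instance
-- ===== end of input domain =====

-- B groups the non-empty lowered initiative names by DISTINCT project id first and runs the
-- substring tests once per distinct id (alternative decomposition; same result, order and all).

-- ===== PORT A =====
-- literal transliteration of A: one pass over projects appending matching pids, then sorted(set(..))
def infer_projects_from_text (text : String) (projects : List (List (String × String))) : List String :=
  let normalized := PySem.Str.lower text
  let matched := projects.foldl (fun acc project =>
      let pid? := (PySem.Dict.mk project).get? "project_id"
      let pname := PySem.Str.lower (((PySem.Dict.mk project).get? "initiative_name").getD "")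
      match pid? with
      | none => acc                                   -- project.get returned None → falsy → continue
      | some pid =>
        if pid = "" then acc                          -- empty id → falsy → continue
        else if PySem.Str.isIn pid normalized ||
                (decide (pname ≠ "") && PySem.Str.isIn pname normalized)
        then acc ++ [pid] else acc) []
  PySem.List.sorted (PySem.Set.ofList matched) (fun x => x) false

-- ===== PORT B =====
-- literal transliteration of B: build index pid → list of non-empty lowered names, then one test per key
def infer_projects_from_text_alt (text : String) (projects : List (List (String × String))) : List String :=
  let normalized := PySem.Str.lower text
  let index : PySem.Dict String (List String) := projects.foldl (fun d project =>
      match (PySem.Dict.mk project).get? "project_id" with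
      | none => d
      | some pid =>
        if pid = "" then d
        else
          let name := PySem.Str.lower (((PySem.Dict.mk project).get? "initiative_name").getD "")
          -- setdefault(pid, []) then conditional append
          d.modify pid [] (fun names => if name = "" then names else names ++ [name]))
    PySem.Dict.empty
  PySem.List.sorted ((index.items.filter (fun q =>
      PySem.Str.isIn q.1 normalized || q.2.any (fun n => PySem.Str.isIn n normalized))).map (fun q => q.1))
    (fun x => x) false

-- ===== PRECONDITION & SPEC =====
def Spec_infer_projects_from_text (text : String) (projects : List (List (String × String))) (out : List String) : Prop := out = infer_projects_from_text_alt text projects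
instance (text : String) (projects : List (List (String × String))) (out : List String) : Decidable (Spec_infer_projects_from_text text projects out) := by unfold Spec_infer_projects_from_text; infer_instance

-- ===== CLAIM (what is proved, stated in full; the proofs are below) =====
def Claim_equal_infer_projects_from_text : Prop := ∀ (text : String) (projects : List (List (String × String))), Dom_infer_projects_from_text text projects → Spec_infer_projects_from_text text projects (infer_projects_from_text text projects)

-- ===== LEMMAS AND PROOFS =====

-- the (truthy pid, non-empty lowered name contribution) a project row yields, shared by both analyses
def pvKey (project : List (String × String)) : Option (String × List String) :=
  match (PySem.Dict.mk project).get? "project_id" with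
  | none => none
  | some pid =>
    if pid = "" then none
    else
      let name := PySem.Str.lower (((PySem.Dict.mk project).get? "initiative_name").getD "")
      some (pid, if name = "" then [] else [name])

def pvHit (nrm : String) (q : String × List String) : Bool :=
  PySem.Str.isIn q.1 nrm || q.2.any (fun n => PySem.Str.isIn n nrm)

def pvContribA (nrm : String) (project : List (String × String)) : List String :=
  match pvKey project with
  | none => []
  | some q => if pvHit nrm q then [q.1] else []

def pvNames (p : String) (project : List (String × String)) : List String :=
  match pvKey project with
  | none => []
  | some q => if q.1 = p then q.2 else []

def pvStepB (d : PySem.Dict String (List String)) (project : List (String × String)) :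
    PySem.Dict String (List String) :=
  match pvKey project with
  | none => d
  | some q => d.modify q.1 [] (fun ns => ns ++ q.2)

lemma pvStepA_eq (nrm : String) (acc : List String) (project : List (String × String)) :
    (let pid? := (PySem.Dict.mk project).get? "project_id"
     let pname := PySem.Str.lower (((PySem.Dict.mk project).get? "initiative_name").getD "")
     match pid? with
     | none => acc
     | some pid =>
       if pid = "" then acc
       else if PySem.Str.isIn pid nrm || (decide (pname ≠ "") && PySem.Str.isIn pname nrm)
       then acc ++ [pid] else acc)
    = acc ++ pvContribA nrm project := by
  unfold pvContribA pvKey pvHit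
  cases h : (PySem.Dict.mk project).get? "project_id" with
  | none => simp
  | some pid =>
    by_cases hpid : pid = ""
    · simp [hpid]
    · by_cases hn : PySem.Str.lower (((PySem.Dict.mk project).get? "initiative_name").getD "") = "" <;>
        · simp only [hpid, hn, if_false, decide_not, decide_true, decide_false]
          split_ifs with hc <;> simp_all

lemma pvStepB_eq (d : PySem.Dict String (List String)) (project : List (String × String)) :
    (match (PySem.Dict.mk project).get? "project_id" with
     | none => d
     | some pid =>
       if pid = "" then d
       else
         let name := PySem.Str.lower (((PySem.Dict.mk project).get? "initiative_name").getD "")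
         d.modify pid [] (fun names => if name = "" then names else names ++ [name]))
    = pvStepB d project := by
  unfold pvStepB pvKey
  cases h : (PySem.Dict.mk project).get? "project_id" with
  | none => simp
  | some pid =>
    by_cases hpid : pid = ""
    · simp [hpid]
    · simp only [hpid, if_false]
      congr 1
      funext ns
      split_ifs with hn <;> simp

lemma mem_pvContribA (nrm p : String) (pr : List (String × String)) :
    p ∈ pvContribA nrm pr ↔ ∃ ns, pvKey pr = some (p, ns) ∧ pvHit nrm (p, ns) = true := by
  unfold pvContribA
  cases h : pvKey pr with
  | none => simp
  | some q =>
    cases q with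
    | mk q1 q2 =>
      cases hh : pvHit nrm (q1, q2) with
      | true =>
        simp only [hh, if_true, List.mem_singleton]
        constructor
        · rintro rfl; exact ⟨q2, rfl, hh⟩
        · rintro ⟨ns, hns, _⟩
          exact (congrArg Prod.fst (Option.some.inj hns)).symm
      | false =>
        simp only [hh, Bool.false_eq_true, if_false, List.not_mem_nil, false_iff]
        rintro ⟨ns, hns, hhit⟩
        rcases Option.some.inj hns with h2
        rw [← h2] at hhit
        rw [hh] at hhit
        exact Bool.false_ne_true hhit

lemma getD_foldB (l : List (List (String × String))) (d : PySem.Dict String (List String)) (p : String) :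
    (l.foldl pvStepB d).getD p [] = d.getD p [] ++ l.flatMap (pvNames p) := by
  induction l generalizing d with
  | nil => simp
  | cons pr l ih =>
    simp only [List.foldl_cons, List.flatMap_cons]
    rw [ih]
    unfold pvStepB pvNames
    cases h : pvKey pr with
    | none => simp
    | some q =>
      rw [PySem.Dict.getD_modify]
      by_cases hq : p = q.1
      · simp [hq, List.append_assoc]
      · have : ¬ q.1 = p := fun hc => hq hc.symm
        simp [hq, this]

lemma mem_keys_foldB (l : List (List (String × String))) (d : PySem.Dict String (List String)) (p : String) :
    p ∈ (l.foldl pvStepB d).keys ↔ p ∈ d.keys ∨ ∃ pr ∈ l, ∃ ns, pvKey pr = some (p, ns) := by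
  induction l generalizing d with
  | nil => simp
  | cons pr l ih =>
    simp only [List.foldl_cons]
    rw [ih]
    have hstep : p ∈ (pvStepB d pr).keys ↔ (∃ ns, pvKey pr = some (p, ns)) ∨ p ∈ d.keys := by
      unfold pvStepB
      cases h : pvKey pr with
      | none => simp
      | some q =>
        rw [PySem.Dict.keys_modify]
        rw [PySem.Dict.mem_keys_insert]
        constructor
        · rintro (rfl | hd)
          · exact Or.inl ⟨q.2, rfl⟩
          · exact Or.inr hd
        · rintro (⟨ns, hns⟩ | hd)
          · exact Or.inl (congrArg Prod.fst (Option.some.inj hns)).symm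
          · exact Or.inr hd
    rw [hstep, List.exists_mem_cons_iff]
    tauto

lemma nodup_keys_foldB (l : List (List (String × String))) (d : PySem.Dict String (List String))
    (h : d.keys.Nodup) : (l.foldl pvStepB d).keys.Nodup := by
  induction l generalizing d with
  | nil => exact h
  | cons pr l ih =>
    simp only [List.foldl_cons]
    apply ih
    unfold pvStepB
    cases hk : pvKey pr with
    | none => exact h
    | some q => rw [PySem.Dict.keys_modify]; exact PySem.Dict.nodup_keys_insert _ _ _ h

lemma mem_flatMap_pvNames (l : List (List (String × String))) (p n : String) :
    n ∈ l.flatMap (pvNames p) ↔ ∃ pr ∈ l, ∃ ns, pvKey pr = some (p, ns) ∧ n ∈ ns := by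
  rw [List.mem_flatMap]
  constructor
  · rintro ⟨pr, hpr, hn⟩
    unfold pvNames at hn
    cases h : pvKey pr with
    | none => rw [h] at hn; simp at hn
    | some q =>
      rw [h] at hn
      by_cases hq : q.1 = p
      · refine ⟨pr, hpr, q.2, ?_, by simpa [hq] using hn⟩
        rw [h, ← hq]
      · simp [hq] at hn
  · rintro ⟨pr, hpr, ns, hk, hn⟩
    exact ⟨pr, hpr, by unfold pvNames; rw [hk]; simpa⟩

lemma mem_filter_items (d : PySem.Dict String (List String)) (f : String × List String → Bool)
    (hnd : d.keys.Nodup) (p : String) :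
    p ∈ (d.items.filter f).map (fun q => q.1) ↔ p ∈ d.keys ∧ f (p, d.getD p []) = true := by
  simp only [List.mem_map, List.mem_filter]
  constructor
  · rintro ⟨q, ⟨hqi, hqf⟩, rfl⟩
    refine ⟨PySem.Dict.mem_keys_of_mem_items _ hqi, ?_⟩
    have : d.getD q.1 [] = q.2 := PySem.Dict.getD_of_mem_items _ (by simpa using hqi) hnd []
    rw [this]; exact hqf
  · rintro ⟨hpk, hpf⟩
    obtain ⟨v, hv⟩ : ∃ v, (p, v) ∈ d.items := by
      simp only [PySem.Dict.keys, List.mem_map] at hpk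
      rcases hpk with ⟨q, hq, hq1⟩
      cases q; cases hq1; exact ⟨_, hq⟩
    have hgd : d.getD p [] = v := PySem.Dict.getD_of_mem_items _ hv hnd []
    exact ⟨(p, v), ⟨hv, by rw [← hgd]; exact hpf⟩, rfl⟩

-- ===== VERDICT (by name: the statement is the Claim_ definition above) =====
theorem infer_projects_from_text_spec : Claim_equal_infer_projects_from_text := by
  intro text projects _
  unfold Spec_infer_projects_from_text infer_projects_from_text infer_projects_from_text_alt
  have hA : (fun (acc : List String) (project : List (String × String)) =>
      let pid? := (PySem.Dict.mk project).get? "project_id"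
      let pname := PySem.Str.lower (((PySem.Dict.mk project).get? "initiative_name").getD "")
      match pid? with
      | none => acc
      | some pid =>
        if pid = "" then acc
        else if PySem.Str.isIn pid (PySem.Str.lower text) ||
                (decide (pname ≠ "") && PySem.Str.isIn pname (PySem.Str.lower text))
        then acc ++ [pid] else acc)
      = fun acc project => acc ++ pvContribA (PySem.Str.lower text) project := by
    funext acc project; exact pvStepA_eq _ _ _
  have hB : (fun (d : PySem.Dict String (List String)) (project : List (String × String)) =>
      match (PySem.Dict.mk project).get? "project_id" with
      | none => d
      | some pid =>
        if pid = "" then d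
        else
          let name := PySem.Str.lower (((PySem.Dict.mk project).get? "initiative_name").getD "")
          d.modify pid [] (fun names => if name = "" then names else names ++ [name]))
      = pvStepB := by
    funext d project; exact pvStepB_eq d project
  simp only []
  rw [hA, hB, PySem.List.foldl_append_eq_flatMap]
  set nrm := PySem.Str.lower text
  have hnd : (projects.foldl pvStepB PySem.Dict.empty).keys.Nodup :=
    nodup_keys_foldB _ _ PySem.Dict.nodup_keys_empty
  rw [PySem.List.sorted_id_eq_sorted_id_iff_perm]
  rw [List.perm_ext_iff_of_nodup (PySem.Set.nodup_ofList _)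
      (List.Nodup.sublist (List.Sublist.map _ List.filter_sublist) hnd)]
  intro p
  rw [PySem.Set.mem_ofList, List.nil_append, mem_filter_items _ _ hnd p]
  rw [mem_keys_foldB, getD_foldB]
  simp only [PySem.Dict.keys_empty, PySem.Dict.getD_empty, List.not_mem_nil, false_or,
    List.nil_append]
  have hmemA : p ∈ projects.flatMap (pvContribA nrm) ↔
      ∃ pr ∈ projects, ∃ ns, pvKey pr = some (p, ns) ∧ pvHit nrm (p, ns) = true := by
    rw [List.mem_flatMap]
    constructor
    · rintro ⟨pr, hpr, hp⟩
      rcases (mem_pvContribA nrm p pr).mp hp with ⟨ns, h1, h2⟩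
      exact ⟨pr, hpr, ns, h1, h2⟩
    · rintro ⟨pr, hpr, ns, h1, h2⟩
      exact ⟨pr, hpr, (mem_pvContribA nrm p pr).mpr ⟨ns, h1, h2⟩⟩
  rw [hmemA]
  unfold pvHit
  simp only [Bool.or_eq_true, List.any_eq_true]
  constructor
  · rintro ⟨pr, hpr, ns, hk, hhit⟩
    refine ⟨⟨pr, hpr, ns, hk⟩, ?_⟩
    rcases hhit with h | ⟨n, hn, hin⟩
    · exact Or.inl h
    · exact Or.inr ⟨n, (mem_flatMap_pvNames projects p n).mpr ⟨pr, hpr, ns, hk, hn⟩, hin⟩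
  · rintro ⟨⟨pr, hpr, ns, hk⟩, hcond⟩
    rcases hcond with h | ⟨n, hn, hin⟩
    · exact ⟨pr, hpr, ns, hk, Or.inl h⟩
    · rcases (mem_flatMap_pvNames projects p n).mp hn with ⟨pr', hpr', ns', hk', hn'⟩
      exact ⟨pr', hpr', ns', hk', Or.inr ⟨n, hn', hin⟩⟩
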